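-- pv_equiv track=rewrite | github.com/daniel-reich/ubiquitous-fiesta | 87YxyfFJ4cw4DsrvB_9.py | generate_rug
-- ===== SOURCE A (Python) =====
-- def generate_rug(n):
--     mid = n//2
--     base = [mid] * n
--     a = [base[:]]
--
--     y = 1
--     for x in range(mid-1, -1, -1):
--         base[y:-y] = [x] * len(base[y:-y])
--         a.append(base[:])
--         y += 1
--     return a + a[::-1][1:]
-- ===== SOURCE B (Python) =====
-- def generate_rug(n):
--     mid = n // 2
--     def row(d):
--         # closed form: cell j of the row at depth d is mid - min(d, j, n-1-j)
--         return list(range(mid, mid - d, -1)) + [mid - d] * (n - 2*d) + list(range(mid - d + 1, mid + 1))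
--     rows = [row(d) for d in range(mid + 1)]
--     return [rows[min(r, 2*mid - r)] for r in range(2*mid + 1)]
-- ===== Notes on version B (the rewrite author's own statement) =====
-- stated objective: simpler
-- what changed: Replaces the cumulative slice-mutation loop plus reverse-and-append mirroring with a direct closed form: the row at depth d = min(r, 2*mid-r) is range(mid, mid-d, -1) + [mid-d]*(n-2*d) + range(mid-d+1, mid+1), built once per depth and indexed for each output row.
-- outside the precondition, e.g. on generate_rug(-3): A returns [[]], B returns []
import Mathlib
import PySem

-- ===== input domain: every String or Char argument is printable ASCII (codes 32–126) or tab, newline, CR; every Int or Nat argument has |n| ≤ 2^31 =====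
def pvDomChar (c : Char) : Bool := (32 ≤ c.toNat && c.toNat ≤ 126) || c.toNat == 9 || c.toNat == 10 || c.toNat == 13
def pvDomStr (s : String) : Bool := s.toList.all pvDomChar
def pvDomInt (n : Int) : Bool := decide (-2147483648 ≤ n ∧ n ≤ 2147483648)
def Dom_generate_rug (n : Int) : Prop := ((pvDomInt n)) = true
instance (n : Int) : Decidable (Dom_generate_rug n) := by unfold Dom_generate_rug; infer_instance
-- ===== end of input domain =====

-- B computes each cell of the rug by a closed form instead of A's cumulative slice-mutation plus mirroring (objective: simpler).


-- ===== PORT A =====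
-- the for-loop over range(mid-1, -1, -1); state = (base, a, y).
-- base[y:-y] = [x]*len(base[y:-y]) is ported as splice take/replicate/drop; exact for the
-- y the loop reaches (1 ≤ y ≤ len(base)//2, where Python's splice is base[:y] ++ new ++ base[len-y:]).
def rugLoop (xs : List Int) (base : List Int) (a : List (List Int)) (y : Int) :
    List Int × List (List Int) :=
  match xs with
  | [] => (base, a)
  | x :: rest =>
      let s := PySem.List.slice base (some y) (some (-y))
      let base' := base.take y.toNat ++ List.replicate s.length x ++ base.drop (base.length - y.toNat)
      rugLoop rest base' (a ++ [base']) (y + 1)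

def generate_rug (n : Int) : List (List Int) :=
  let mid := PySem.Int.floordiv n 2
  let base := List.replicate n.toNat mid       -- [mid] * n (empty for n < 0, like Python)
  let a := [base]
  let r := rugLoop (PySem.List.pyRange (mid - 1) (-1) (-1)) base a 1
  r.2 ++ r.2.reverse.drop 1                    -- a + a[::-1][1:] ([::-1] = reverse, [1:] = drop 1)

-- ===== PORT B =====
-- B's helper row(d): list(range(mid, mid-d, -1)) + [mid-d]*(n-2*d) + list(range(mid-d+1, mid+1))
def rowAlt (n mid d : Int) : List Int :=
  PySem.List.pyRange mid (mid - d) (-1) ++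
    List.replicate (n - 2 * d).toNat (mid - d) ++       -- [v] * k is empty for k < 0, like Python
    PySem.List.pyRange (mid - d + 1) (mid + 1) 1

def generate_rug_alt (n : Int) : List (List Int) :=
  let mid := PySem.Int.floordiv n 2
  let rows := (PySem.List.pyRange 0 (mid + 1) 1).map (fun d => rowAlt n mid d)
  -- rows[min(r, 2*mid-r)]: the index is provably in range, so pyGetD's default is never used
  (PySem.List.pyRange 0 (2 * mid + 1) 1).map (fun r => PySem.List.pyGetD rows (min r (2 * mid - r)) [])

-- ===== PRECONDITION & SPEC =====
-- Pre_ restricts to the task's natural domain, nonnegative rug sizes: a negative size is outside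
-- the function's purpose and neither output is specified there (see claim.json cites).
def Pre_generate_rug (n : Int) : Prop := 0 ≤ n
instance (n : Int) : Decidable (Pre_generate_rug n) := by unfold Pre_generate_rug; infer_instance
def pvWitness_generate_rug : Int := (5)

def Spec_generate_rug (n : Int) (out : List (List Int)) : Prop := out = generate_rug_alt n
instance (n : Int) (out : List (List Int)) : Decidable (Spec_generate_rug n out) := by unfold Spec_generate_rug; infer_instance

-- ===== CLAIM (what is proved, stated in full; the proofs are below) =====
def Claim_equal_generate_rug : Prop := ∀ (n : Int), Dom_generate_rug n → Pre_generate_rug n → Spec_generate_rug n (generate_rug n)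

-- ===== LEMMAS AND PROOFS =====

-- the rug row at depth y: [mid - min y (min j (n-1-j)) for j in range(n)]
def rowF (n mid y : Int) : List Int :=
  (PySem.List.pyRange 0 n 1).map (fun j => mid - min y (min j (n - 1 - j)))

theorem rowF_length (n mid y : Int) : (rowF n mid y).length = n.toNat := by
  simp [rowF, PySem.List.length_pyRange_one]

theorem rowF_getElem (n mid y : Int) (i : Nat) (h : i < (rowF n mid y).length) :
    (rowF n mid y)[i] = mid - min y (min (i : Int) (n - 1 - i)) := by
  simp [rowF, PySem.List.getElem_pyRange_one]

-- one slice-assignment step of A's loop turns the row of depth y-1 into the row of depth y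
theorem step_lemma (n mid y : Int) (hn : 0 ≤ n) (hmid : mid = PySem.Int.floordiv n 2)
    (hy1 : 1 ≤ y) (hy2 : y ≤ mid) :
    (rowF n mid (y - 1)).take y.toNat ++
      List.replicate (PySem.List.slice (rowF n mid (y - 1)) (some y) (some (-y))).length (mid - y) ++
      (rowF n mid (y - 1)).drop ((rowF n mid (y - 1)).length - y.toNat) = rowF n mid y := by
  have h2 : 2 * mid ≤ n := by
    rw [hmid, PySem.Int.floordiv_eq_ediv_of_pos (by norm_num)]; omega
  have hmn : 0 ≤ mid := by
    rw [hmid, PySem.Int.floordiv_eq_ediv_of_pos (by norm_num)]; omega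
  clear hmid
  set t := y.toNat with ht
  have hyt : y = (t : Int) := (Int.toNat_of_nonneg (by omega)).symm
  have hmcast : ((n.toNat : Int)) = n := Int.toNat_of_nonneg hn
  have htm : 2 * t ≤ n.toNat := by omega
  have hslen : (PySem.List.slice (rowF n mid (y - 1)) (some y) (some (-y))).length
      = n.toNat - t - t := by
    rw [PySem.List.length_slice, hyt, PySem.List.clampIdx_natCast,
        PySem.List.clampIdx_neg_natCast _ _ (by omega), rowF_length]
    omega
  rw [hslen, rowF_length]
  have hl1 : ((rowF n mid (y - 1)).take t).length = t := by
    rw [List.length_take, rowF_length]; omega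
  apply List.ext_getElem
  · simp only [List.length_append, List.length_replicate, List.length_drop, rowF_length, hl1]
    omega
  · intro i h1 h2'
    have hi : i < n.toNat := by rwa [rowF_length] at h2'
    rw [rowF_getElem]
    have hl12 : ((rowF n mid (y - 1)).take t ++ List.replicate (n.toNat - t - t) (mid - y)).length
        = n.toNat - t := by
      simp only [List.length_append, List.length_replicate, hl1]; omega
    rcases lt_or_ge i (n.toNat - t) with hc | hc
    · rw [List.getElem_append_left (by rw [hl12]; omega)]
      rcases lt_or_ge i t with hc2 | hc2
      · rw [List.getElem_append_left (by rw [hl1]; omega),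
            List.getElem_take, rowF_getElem]
        omega
      · rw [List.getElem_append_right (by rw [hl1]; omega),
            List.getElem_replicate]
        omega
    · rw [List.getElem_append_right (by rw [hl12]; omega),
          List.getElem_drop, rowF_getElem]
      have hidx : n.toNat - t
          + (i - ((rowF n mid (y-1)).take t ++ List.replicate (n.toNat - t - t) (mid - y)).length) = i := by
        rw [hl12]; omega
      rw [hidx]
      omega

-- invariant of A's loop: after processing x = k-1 … 0 it has appended the rows of depths
-- mid-k+1 … mid and base is the deepest row
theorem loop_inv (n mid : Int) (hn : 0 ≤ n) (hmid : mid = PySem.Int.floordiv n 2) :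
    ∀ (k : Nat) (acc : List (List Int)), (k : Int) ≤ mid →
      rugLoop (PySem.List.pyRange ((k : Int) - 1) (-1) (-1)) (rowF n mid (mid - k)) acc (mid - k + 1)
        = (rowF n mid mid, acc ++ (List.range k).map (fun i : Nat => rowF n mid (mid - k + 1 + (i : Int)))) := by
  intro k
  induction k with
  | zero =>
      intro acc _
      rw [PySem.List.pyRange_neg_one_eq_nil (by norm_num)]
      simp [rugLoop]
  | succ k ih =>
      intro acc hk
      have hc : (((k+1 : Nat)) : Int) = (k : Int) + 1 := by push_cast; ring
      rw [hc] at hk ⊢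
      have h1 : mid - ((k : Int) + 1) + 1 = mid - k := by ring
      have h2 : mid - ((k : Int) + 1) = (mid - k) - 1 := by ring
      rw [show (k : Int) + 1 - 1 = (k : Int) by ring,
          PySem.List.pyRange_neg_one_cons (by omega), h1, h2]
      simp only [rugLoop]
      have hstep : (rowF n mid ((mid - (k:Int)) - 1)).take (mid - (k:Int)).toNat ++
          List.replicate (PySem.List.slice (rowF n mid ((mid - (k:Int)) - 1))
            (some (mid - k)) (some (-(mid - (k:Int))))).length (k : Int) ++
          (rowF n mid ((mid - (k:Int)) - 1)).drop
            ((rowF n mid ((mid - (k:Int)) - 1)).length - (mid - (k:Int)).toNat)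
          = rowF n mid (mid - k) := by
        have h := step_lemma n mid (mid - k) hn hmid (by omega) (by omega)
        have hx : mid - (mid - (k:Int)) = (k:Int) := by ring
        rwa [hx] at h
      rw [hstep, ih (acc ++ [rowF n mid (mid - k)]) (by omega)]
      have hsplit : (List.range (k+1)).map (fun i : Nat => rowF n mid (mid - (k:Int) + (i : Int)))
          = rowF n mid (mid - k) :: (List.range k).map (fun i : Nat => rowF n mid (mid - (k:Int) + 1 + (i : Int))) := by
        rw [List.range_succ_eq_map, List.map_cons, List.map_map]
        congr 1
        · congr 1; push_cast; ring
        · apply List.map_congr_left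
          intro i _
          show rowF n mid _ = rowF n mid _
          congr 1; push_cast; ring
      rw [List.append_assoc]
      congr 1
      rw [hsplit]
      rfl

-- B's piecewise row equals the closed-form row at depth d
theorem rowAlt_eq_rowF (n mid d : Int) (hn : 0 ≤ n) (hmid : mid = PySem.Int.floordiv n 2)
    (hd0 : 0 ≤ d) (hdm : d ≤ mid) : rowAlt n mid d = rowF n mid d := by
  have h2m : 2 * mid ≤ n := by
    rw [hmid, PySem.Int.floordiv_eq_ediv_of_pos (by norm_num)]; omega
  have hmn : 0 ≤ mid := by
    rw [hmid, PySem.Int.floordiv_eq_ediv_of_pos (by norm_num)]; omega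
  rw [rowAlt, PySem.List.pyRange_neg_one, PySem.List.pyRange_one]
  have e1 : (mid - (mid - d)).toNat = d.toNat := by omega
  have e2 : (mid + 1 - (mid - d + 1)).toNat = d.toNat := by omega
  rw [e1, e2]
  have hl12 : ((List.range d.toNat).map (fun k : Nat => mid - (k : Int)) ++
      List.replicate (n - 2 * d).toNat (mid - d)).length = (n - d).toNat := by
    simp only [List.length_append, List.length_map, List.length_range, List.length_replicate]
    omega
  apply List.ext_getElem
  · simp only [List.length_append, List.length_map, List.length_range,
      List.length_replicate, rowF_length]
    omega
  · intro i h1 h2'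
    have hi : i < n.toNat := by rwa [rowF_length] at h2'
    rw [rowF_getElem]
    rcases lt_or_ge i (n - d).toNat with hc | hc
    · rw [List.getElem_append_left (by rw [hl12]; omega)]
      rcases lt_or_ge i d.toNat with hc2 | hc2
      · rw [List.getElem_append_left (by simp only [List.length_map, List.length_range]; omega),
            List.getElem_map, List.getElem_range]
        omega
      · rw [List.getElem_append_right (by simp only [List.length_map, List.length_range]; omega),
            List.getElem_replicate]
        omega
    · rw [List.getElem_append_right (by rw [hl12]; omega),
          List.getElem_map, List.getElem_range]
      rw [hl12]
      omega

theorem main_lemma (n : Int) (hn : 0 ≤ n) : generate_rug n = generate_rug_alt n := by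
  simp only [generate_rug, generate_rug_alt]
  generalize hm : PySem.Int.floordiv n 2 = mid
  have hmid : mid = PySem.Int.floordiv n 2 := hm.symm
  have h2m : 2 * mid ≤ n := by
    rw [hmid, PySem.Int.floordiv_eq_ediv_of_pos (by norm_num)]; omega
  have hmn : 0 ≤ mid := by
    rw [hmid, PySem.Int.floordiv_eq_ediv_of_pos (by norm_num)]; omega
  have hcast : ((mid.toNat : Int)) = mid := Int.toNat_of_nonneg hmn
  have hbase : List.replicate n.toNat mid = rowF n mid 0 := by
    apply List.ext_getElem
    · simp [rowF_length]
    · intro i h1 h2'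
      have hi : i < n.toNat := by simpa using h1
      rw [List.getElem_replicate, rowF_getElem]
      omega
  have hloop := loop_inv n mid hn hmid mid.toNat [rowF n mid 0] (by omega)
  rw [hcast] at hloop
  simp only [sub_self, zero_add] at hloop
  rw [hbase, hloop]
  have hM : ([rowF n mid 0] ++ (List.range mid.toNat).map (fun i : Nat => rowF n mid (1 + (i : Int))))
      = (List.range (mid.toNat + 1)).map (fun q : Nat => rowF n mid (q : Int)) := by
    rw [List.range_succ_eq_map, List.map_cons, List.map_map, List.singleton_append]
    refine List.cons_eq_cons.mpr ⟨by norm_num, ?_⟩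
    apply List.map_congr_left
    intro a _
    show rowF n mid _ = rowF n mid _
    congr 1; push_cast; ring
  rw [hM]
  have hrows : (PySem.List.pyRange 0 (2 * mid + 1) 1).map (fun r =>
        PySem.List.pyGetD ((PySem.List.pyRange 0 (mid + 1) 1).map (fun d => rowAlt n mid d)) (min r (2 * mid - r)) [])
      = (PySem.List.pyRange 0 (2 * mid + 1) 1).map (fun r => rowF n mid (min r (2 * mid - r))) := by
    apply List.map_congr_left
    intro r hr
    rw [PySem.List.mem_pyRange_one] at hr
    rw [PySem.List.pyGetD_map_pyRange_of_nonneg _ _ _ _ (by omega) (by omega)]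
    exact rowAlt_eq_rowF n mid _ hn hmid (by omega) (by omega)
  rw [hrows]
  set K := mid.toNat with hK
  apply List.ext_getElem
  · simp only [List.length_append, List.length_drop, List.length_reverse, List.length_map,
      List.length_range, PySem.List.length_pyRange_one]
    omega
  · intro i h1 h2'
    have hi : i < 2 * K + 1 := by
      simp only [List.length_map, PySem.List.length_pyRange_one] at h2'
      omega
    rw [List.getElem_map, PySem.List.getElem_pyRange_one]
    have hlen : ((List.range (K + 1)).map (fun q : Nat => rowF n mid (q : Int))).length = K + 1 := by
      simp
    rcases lt_or_ge i (K + 1) with hc | hc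
    · rw [List.getElem_append_left (by rw [hlen]; omega), List.getElem_map, List.getElem_range]
      congr 1
      omega
    · rw [List.getElem_append_right (by rw [hlen]; omega), List.getElem_drop,
          List.getElem_reverse, List.getElem_map, List.getElem_range]
      congr 1
      simp only [hlen]
      omega

-- ===== VERDICT (by name: the statement is the Claim_ definition above) =====
theorem generate_rug_spec : Claim_equal_generate_rug := by
  intro n _ hpre
  unfold Spec_generate_rug
  exact main_lemma n hpre
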